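-- pv_equiv track=rewrite | github.com/seungh0/programmers-algorithm | 20210328/2110.py | solution
-- ===== SOURCE A (Python) =====
-- def solution(n, c, array):
--     array.sort()
--     start = array[1] - array[0]
--     end = array[-1] - array[0]
--     result = 0
--
--     while start <= end:
--         mid = (start + end) // 2
--         value = array[0]
--         count = 0
--         for i in range(1, n):
--             if array[i] >= value + mid:
--                 count += 1
--
--         if count >= c:
--             result = mid
--             start = mid + 1
--         else:
--             end = mid - 1
--     return result
-- ===== SOURCE B (Python) =====
-- def solution(n, c, array):
--     # Same return value as A (which sorts array in place; so do we), computed in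
--     # O(1) after the sort: A's per-mid count is |{i in [1,n): array[i] >= array[0]+mid}|,
--     # which for c >= 1 holds iff mid <= array[n-c] - array[0]; the binary search over
--     # [array[1]-array[0], array[-1]-array[0]] therefore returns a clamped threshold.
--     array.sort()
--     lo = array[1] - array[0]
--     hi = array[-1] - array[0]
--     if c <= 0:
--         return hi
--     if n - 1 < c:
--         return 0
--     t = array[n - c] - array[0]
--     if t < lo:
--         return 0
--     return min(t, hi)
-- ===== Notes on version B (the rewrite author's own statement) =====
-- stated objective: faster
-- what changed: Replaces the binary search with per-mid linear counting by a direct closed form: after sorting, A's count predicate holds iff mid <= array[n-c]-array[0], so the answer is that threshold clamped into [array[1]-array[0], array[-1]-array[0]] (0 if infeasible).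
import Mathlib
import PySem

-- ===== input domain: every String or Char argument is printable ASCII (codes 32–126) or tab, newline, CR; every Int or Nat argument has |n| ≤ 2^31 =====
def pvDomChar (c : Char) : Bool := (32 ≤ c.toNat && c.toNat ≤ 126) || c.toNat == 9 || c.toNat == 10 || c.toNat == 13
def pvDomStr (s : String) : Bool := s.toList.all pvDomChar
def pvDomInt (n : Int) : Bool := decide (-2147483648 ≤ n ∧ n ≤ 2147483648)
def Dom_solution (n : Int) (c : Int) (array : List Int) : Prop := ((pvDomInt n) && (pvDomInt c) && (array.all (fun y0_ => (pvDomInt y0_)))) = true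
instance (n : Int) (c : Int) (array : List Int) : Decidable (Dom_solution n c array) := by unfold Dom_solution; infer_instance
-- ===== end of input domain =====

-- B replaces A's binary search (with a linear count per midpoint) by a closed-form
-- clamped threshold after the same sort; both versions sort `array` in place in
-- Python — the theorems below are about the return value.

-- ===== PORT A =====
-- the inner 'for i in range(1, n)' counting loop (pyGetD is exact inside Pre_, where every index is in range)
def cntA (s : List Int) (n value mid : Int) : Int :=
  (PySem.List.pyRange 1 n 1).foldl
    (fun count i => if PySem.List.pyGetD s i 0 ≥ value + mid then count + 1 else count) 0

-- the 'while start <= end' binary-search loop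
def loopA (s : List Int) (n c : Int) (start end_ result : Int) : Int :=
  if h : start ≤ end_ then
    let mid := PySem.Int.floordiv (start + end_) 2
    let value := PySem.List.pyGetD s 0 0
    let count := cntA s n value mid
    if count ≥ c then loopA s n c (mid + 1) end_ mid
    else loopA s n c start (mid - 1) result
  else result
termination_by (end_ - start + 1).toNat
decreasing_by
  · have := PySem.Int.floordiv_two_mid_bounds h; omega
  · have := PySem.Int.floordiv_two_mid_bounds h; omega

def solution (n : Int) (c : Int) (array : List Int) : Int :=
  let s := PySem.List.sorted array (fun x => x) false
  let start := PySem.List.pyGetD s 1 0 - PySem.List.pyGetD s 0 0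
  let end_ := PySem.List.pyGetD s (-1) 0 - PySem.List.pyGetD s 0 0
  loopA s n c start end_ 0

-- ===== PORT B =====
def solution_alt (n : Int) (c : Int) (array : List Int) : Int :=
  let s := PySem.List.sorted array (fun x => x) false
  let lo := PySem.List.pyGetD s 1 0 - PySem.List.pyGetD s 0 0
  let hi := PySem.List.pyGetD s (-1) 0 - PySem.List.pyGetD s 0 0
  if c ≤ 0 then hi
  else if n - 1 < c then 0
  else
    let t := PySem.List.pyGetD s (n - c) 0 - PySem.List.pyGetD s 0 0
    if t < lo then 0 else min t hi

-- ===== PRECONDITION & SPEC =====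
-- Pre_ excludes exactly the inputs where the Python A raises IndexError:
-- array[1] needs len(array) ≥ 2, and the loop 'for i in range(1, n): array[i]' needs n ≤ len(array).
def Pre_solution (n : Int) (c : Int) (array : List Int) : Prop :=
  2 ≤ array.length ∧ n ≤ (array.length : Int)
instance (n : Int) (c : Int) (array : List Int) : Decidable (Pre_solution n c array) := by
  unfold Pre_solution; infer_instance

def pvWitness_solution : Int × Int × List Int := (3, 2, [1, 5, 9])

def Spec_solution (n : Int) (c : Int) (array : List Int) (out : Int) : Prop := out = solution_alt n c array
instance (n : Int) (c : Int) (array : List Int) (out : Int) : Decidable (Spec_solution n c array out) := by unfold Spec_solution; infer_instance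

-- ===== CLAIM (what is proved, stated in full; the proofs are below) =====
def Claim_equal_solution : Prop := ∀ (n : Int) (c : Int) (array : List Int), Dom_solution n c array → Pre_solution n c array → Spec_solution n c array (solution n c array)

-- ===== LEMMAS AND PROOFS =====

-- A's counting loop is a countP over the index range
theorem cntA_eq_countP (s : List Int) (n value mid : Int) :
    cntA s n value mid =
      ((List.range (n - 1).toNat).countP
        (fun (k : Nat) => decide (PySem.List.pyGetD s (1 + (k : Int)) 0 ≥ value + mid)) : Int) := by
  unfold cntA
  rw [PySem.List.pyRange_one, List.foldl_map, PySem.List.foldl_ite_add_one, zero_add]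

-- chain an upward-closed predicate on range indices
theorem chainQ (nn : Nat) (Q : Nat → Bool) (hmono : ∀ k, k + 1 < nn → Q k = true → Q (k + 1) = true) :
    ∀ d j, j + d < nn → Q j = true → Q (j + d) = true := by
  intro d
  induction d with
  | zero => intro j _ h; simpa using h
  | succ d ih =>
    intro j hlt hj
    have h1 : Q (j + d) = true := ih j (by omega) hj
    have := hmono (j + d) (by omega) h1
    simpa [Nat.add_assoc] using this

-- an upward-closed predicate has count ≥ cc on range nn iff it holds at nn - cc
theorem countP_range_threshold (nn cc : Nat) (Q : Nat → Bool)
    (hmono : ∀ k, k + 1 < nn → Q k = true → Q (k + 1) = true)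
    (h1 : 1 ≤ cc) (h2 : cc ≤ nn) :
    cc ≤ (List.range nn).countP Q ↔ Q (nn - cc) = true := by
  constructor
  · intro hcnt
    by_contra hQ
    have hnone : ∀ k, k ≤ nn - cc → Q k = false := by
      intro k hk
      by_contra hQk
      have hQk' : Q k = true := by
        cases h : Q k with
        | false => exact absurd h hQk
        | true => rfl
      have := chainQ nn Q hmono (nn - cc - k) k (by omega) hQk'
      have hkk : k + (nn - cc - k) = nn - cc := by omega
      rw [hkk] at this
      exact hQ this
    have hsplit : List.range nn = List.range' 0 (nn - cc + 1) ++ List.range' (nn - cc + 1) (cc - 1) := by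
      conv_lhs => rw [show nn = (nn - cc + 1) + (cc - 1) by omega, List.range_eq_range']
      have h := List.range'_append_1 (s := 0) (m := nn - cc + 1) (n := cc - 1)
      simp only [Nat.zero_add] at h
      rw [← h]
    rw [hsplit, List.countP_append] at hcnt
    have hz : (List.range' 0 (nn - cc + 1)).countP Q = 0 := by
      rw [List.countP_eq_zero]
      intro k hk
      have := List.mem_range'_1.mp hk
      simp [hnone k (by omega)]
    have hle : (List.range' (nn - cc + 1) (cc - 1)).countP Q ≤ cc - 1 := by
      have := List.countP_le_length (l := List.range' (nn - cc + 1) (cc - 1)) (p := Q)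
      simpa using this
    omega
  · intro hQ
    have hsplit : List.range nn = List.range' 0 (nn - cc) ++ List.range' (nn - cc) cc := by
      conv_lhs => rw [show nn = (nn - cc) + cc by omega, List.range_eq_range']
      have h := List.range'_append_1 (s := 0) (m := nn - cc) (n := cc)
      simp only [Nat.zero_add] at h
      rw [← h]
    rw [hsplit, List.countP_append]
    have hall : (List.range' (nn - cc) cc).countP Q = cc := by
      have h : ∀ k ∈ List.range' (nn - cc) cc, Q k = true := by
        intro k hk
        have hm := List.mem_range'_1.mp hk
        have := chainQ nn Q hmono (k - (nn - cc)) (nn - cc) (by omega) hQ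
        have hkk : nn - cc + (k - (nn - cc)) = k := by omega
        rwa [hkk] at this
      have := List.countP_eq_length.mpr h
      simpa using this
    omega

-- pred-always-true branch of the while loop: result converges to end_
theorem loopA_true (s : List Int) (n c : Int)
    (hp : ∀ m : Int, cntA s n (PySem.List.pyGetD s 0 0) m ≥ c) :
    ∀ (N : Nat) (lo hi res : Int), (hi - lo + 1).toNat ≤ N →
      loopA s n c lo hi res = if lo ≤ hi then hi else res := by
  intro N
  induction N with
  | zero =>
    intro lo hi res hN
    rw [loopA]
    have : ¬ lo ≤ hi := by omega
    simp [this]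
  | succ N ih =>
    intro lo hi res hN
    rw [loopA]
    by_cases h : lo ≤ hi
    · have hb := PySem.Int.floordiv_two_mid_bounds h
      rw [dif_pos h]
      show (if cntA s n (PySem.List.pyGetD s 0 0) (PySem.Int.floordiv (lo + hi) 2) ≥ c then
          loopA s n c (PySem.Int.floordiv (lo + hi) 2 + 1) hi (PySem.Int.floordiv (lo + hi) 2)
        else loopA s n c lo (PySem.Int.floordiv (lo + hi) 2 - 1) res) = _
      rw [if_pos (hp _), ih _ _ _ (by omega), if_pos h]
      split_ifs <;> omega
    · simp [h]

-- pred-always-false branch: result is never assigned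
theorem loopA_false (s : List Int) (n c : Int)
    (hp : ∀ m : Int, ¬ cntA s n (PySem.List.pyGetD s 0 0) m ≥ c) :
    ∀ (N : Nat) (lo hi res : Int), (hi - lo + 1).toNat ≤ N →
      loopA s n c lo hi res = res := by
  intro N
  induction N with
  | zero =>
    intro lo hi res hN
    rw [loopA]
    have : ¬ lo ≤ hi := by omega
    simp [this]
  | succ N ih =>
    intro lo hi res hN
    rw [loopA]
    by_cases h : lo ≤ hi
    · have hb := PySem.Int.floordiv_two_mid_bounds h
      rw [dif_pos h]
      show (if cntA s n (PySem.List.pyGetD s 0 0) (PySem.Int.floordiv (lo + hi) 2) ≥ c then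
          loopA s n c (PySem.Int.floordiv (lo + hi) 2 + 1) hi (PySem.Int.floordiv (lo + hi) 2)
        else loopA s n c lo (PySem.Int.floordiv (lo + hi) 2 - 1) res) = _
      rw [if_neg (hp _)]
      exact ih _ _ _ (by omega)
    · simp [h]

-- threshold predicate: the binary search returns the threshold clamped into [lo, hi]
theorem loopA_thresh (s : List Int) (n c T : Int)
    (hp : ∀ m : Int, cntA s n (PySem.List.pyGetD s 0 0) m ≥ c ↔ m ≤ T) :
    ∀ (N : Nat) (lo hi res : Int), (hi - lo + 1).toNat ≤ N →
      loopA s n c lo hi res = if lo ≤ hi ∧ lo ≤ T then min T hi else res := by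
  intro N
  induction N with
  | zero =>
    intro lo hi res hN
    rw [loopA]
    have h1 : ¬ lo ≤ hi := by omega
    simp [h1]
  | succ N ih =>
    intro lo hi res hN
    rw [loopA]
    by_cases h : lo ≤ hi
    · have hb := PySem.Int.floordiv_two_mid_bounds h
      rw [dif_pos h]
      show (if cntA s n (PySem.List.pyGetD s 0 0) (PySem.Int.floordiv (lo + hi) 2) ≥ c then
          loopA s n c (PySem.Int.floordiv (lo + hi) 2 + 1) hi (PySem.Int.floordiv (lo + hi) 2)
        else loopA s n c lo (PySem.Int.floordiv (lo + hi) 2 - 1) res) = _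
      by_cases hT : PySem.Int.floordiv (lo + hi) 2 ≤ T
      · rw [if_pos ((hp _).mpr hT), ih _ _ _ (by omega)]
        split_ifs <;> omega
      · rw [if_neg (fun hcnt => hT ((hp _).mp hcnt)), ih _ _ _ (by omega)]
        split_ifs <;> omega
    · simp [h]

-- the characterisation of A's count against the sorted list: with 1 ≤ c ≤ n - 1 it is a threshold test
theorem cnt_threshold (s : List Int) (n c : Int)
    (hmon : ∀ p q : Nat, p ≤ q → q < s.length → s.getD p 0 ≤ s.getD q 0)
    (hc1 : 1 ≤ c) (hcn : c ≤ n - 1) (hnL : n ≤ (s.length : Int)) :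
    ∀ m : Int, cntA s n (PySem.List.pyGetD s 0 0) m ≥ c ↔
      m ≤ PySem.List.pyGetD s (n - c) 0 - PySem.List.pyGetD s 0 0 := by
  intro m
  rw [cntA_eq_countP]
  set v := PySem.List.pyGetD s 0 0 with hvdef
  set nn := (n - 1).toNat with hnn
  set cc := c.toNat with hcc
  have hnn1 : (nn : Int) = n - 1 := by omega
  have hccc : (cc : Int) = c := by omega
  set Q : Nat → Bool := fun k => decide (v + m ≤ s.getD (k + 1) 0) with hQ
  have hcntP : (List.range nn).countP
      (fun (k : Nat) => decide (PySem.List.pyGetD s (1 + (k : Int)) 0 ≥ v + m)) =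
      (List.range nn).countP Q := by
    apply List.countP_congr
    intro k hk
    have hcast : (1 + (k : Int)) = ((k + 1 : Nat) : Int) := by push_cast; ring
    simp only [hQ, hcast, PySem.List.pyGetD_natCast, ge_iff_le, decide_eq_true_eq]
  rw [hcntP]
  have hmono : ∀ k, k + 1 < nn → Q k = true → Q (k + 1) = true := by
    intro k hk h
    simp only [hQ, decide_eq_true_eq] at h ⊢
    have h2 : s.getD (k + 1) 0 ≤ s.getD (k + 1 + 1) 0 := hmon (k + 1) (k + 2) (by omega) (by omega)
    omega
  have hth := countP_range_threshold nn cc Q hmono (by omega) (by omega)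
  have htarget : PySem.List.pyGetD s (n - c) 0 = s.getD (nn - cc + 1) 0 := by
    rw [show (n - c) = ((nn - cc + 1 : Nat) : Int) by omega, PySem.List.pyGetD_natCast]
  constructor
  · intro hge
    have h1 : cc ≤ (List.range nn).countP Q := by omega
    have h2 := hth.mp h1
    simp only [hQ, decide_eq_true_eq] at h2
    rw [htarget]
    omega
  · intro hle
    rw [htarget] at hle
    have hQt : Q (nn - cc) = true := by
      simp only [hQ, decide_eq_true_eq]
      omega
    have := hth.mpr hQt
    omega

-- ===== VERDICT (by name: the statement is the Claim_ definition above) =====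
theorem solution_spec : Claim_equal_solution := by
  intro n c array _hdom hpre
  obtain ⟨hlen, hn⟩ := hpre
  simp only [Spec_solution, solution, solution_alt]
  have hslen : (PySem.List.sorted array (fun x => x) false).length = array.length :=
    PySem.List.length_sorted array (fun x => x) false
  have hmon : ∀ p q : Nat, p ≤ q → q < (PySem.List.sorted array (fun x => x) false).length →
      (PySem.List.sorted array (fun x => x) false).getD p 0 ≤
      (PySem.List.sorted array (fun x => x) false).getD q 0 := by
    intro p q hpq hq
    rw [List.getD_eq_getElem _ 0 (lt_of_le_of_lt hpq hq), List.getD_eq_getElem _ 0 hq]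
    exact PySem.List.sorted_id_getElem_mono array hpq hq
  set s := PySem.List.sorted array (fun x => x) false with hs
  have hL : 2 ≤ s.length := by omega
  have hnL : n ≤ (s.length : Int) := by omega
  have h1 : PySem.List.pyGetD s 1 0 = s.getD 1 0 := PySem.List.pyGetD_ofNat' s 1 0
  have h0 : PySem.List.pyGetD s 0 0 = s.getD 0 0 := PySem.List.pyGetD_ofNat' s 0 0
  have hhi : PySem.List.pyGetD s (-1) 0 = s.getD (s.length - 1) 0 := by
    simp [PySem.List.pyGetD, PySem.List.pyGet?_neg_one, List.getLast?_eq_getElem?,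
      List.getElem?_eq_getElem (show s.length - 1 < s.length by omega)]
  have hlohi : PySem.List.pyGetD s 1 0 - PySem.List.pyGetD s 0 0 ≤
      PySem.List.pyGetD s (-1) 0 - PySem.List.pyGetD s 0 0 := by
    rw [h1, hhi]
    have := hmon 1 (s.length - 1) (by omega) (by omega)
    omega
  by_cases hc : c ≤ 0
  · -- count is a cast Nat count, hence nonnegative: the loop condition always holds
    have hp : ∀ m : Int, cntA s n (PySem.List.pyGetD s 0 0) m ≥ c := by
      intro m
      rw [cntA_eq_countP]
      have h2 : (0 : Int) ≤ (((List.range (n - 1).toNat).countP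
          (fun (k : Nat) => decide (PySem.List.pyGetD s (1 + (k : Int)) 0 ≥
            PySem.List.pyGetD s 0 0 + m))) : Int) := by positivity
      omega
    rw [loopA_true s n c hp _ _ _ _ (le_refl _)]
    split_ifs <;> omega
  · by_cases hcn : n - 1 < c
    · -- count ≤ n - 1 < c: the loop condition never holds
      have hp : ∀ m : Int, ¬ cntA s n (PySem.List.pyGetD s 0 0) m ≥ c := by
        intro m
        rw [cntA_eq_countP]
        have hle : ((List.range (n - 1).toNat).countP
            (fun (k : Nat) => decide (PySem.List.pyGetD s (1 + (k : Int)) 0 ≥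
              PySem.List.pyGetD s 0 0 + m))) ≤ (n - 1).toNat := by
          calc _ ≤ (List.range (n - 1).toNat).length := List.countP_le_length
          _ = (n - 1).toNat := List.length_range
        omega
      rw [loopA_false s n c hp _ _ _ _ (le_refl _)]
      split_ifs <;> omega
    · have hp := cnt_threshold s n c hmon (by omega) (by omega) hnL
      rw [loopA_thresh s n c _ hp _ _ _ _ (le_refl _)]
      split_ifs <;> omega
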